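-- pv_equiv track=rewrite | github.com/JingxuOuyang/leetcode | 2901getWordsInLongestSubsequence.py | getWordsInLongestSubsequence
-- ===== SOURCE A (Python) =====
-- from typing import List
--
-- def getWordsInLongestSubsequence(words: List[str], groups: List[int]) -> List[str]:
--     #n = len(words)
--     dp = list()
--     for i, word in enumerate(words):
--         group = groups[i]
--         maxLen, maxJ = 1, -1
--         for j in range(i):
--             if groups[j] == group:
--                 continue
--             wordj = words[j]
--             if len(wordj) != len(word):
--                 continue
--             dis = 0
--             for k in range(len(word)):
--                 if word[k] != wordj[k]:
--                     dis += 1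
--                     if dis > 1:
--                         break
--             if dis == 1:
--                 l = dp[j][0] + 1
--                 if l > maxLen:
--                     maxLen = l
--                     maxJ = j
--         dp.append((maxLen, maxJ))
--     index = max(range(len(dp)), key=lambda i: dp[i][0])
--     ans = []
--     while index >= 0:
--         ans.append(words[index])
--         index = dp[index][1]
--     ans.reverse()
--     return ans
-- ===== SOURCE B (Python) =====
-- from typing import List
--
--
-- def getWordsInLongestSubsequence(words: List[str], groups: List[int]) -> List[str]:
--     if not words:
--         return []
--
--     def ok(i: int, j: int) -> bool:
--         return (groups[i] != groups[j]
--                 and len(words[i]) == len(words[j])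
--                 and sum(a != b for a, b in zip(words[i], words[j])) == 1)
--
--     # lengths-only DP: dp[i] = length of the best subsequence ending at i
--     dp = []
--     for i in range(len(words)):
--         dp.append(1 + max((dp[j] for j in range(i) if ok(i, j)), default=0))
--
--     # reconstruct by re-searching predecessors, building the answer front-first
--     i = dp.index(max(dp))
--     ans = []
--     while True:
--         ans.insert(0, words[i])
--         if dp[i] == 1:
--             break
--         i = next(j for j in range(i) if ok(i, j) and dp[j] == dp[i] - 1)
--     return ans
-- ===== Notes on version B (the rewrite author's own statement) =====
-- stated objective: alternative
-- what changed: B computes a lengths-only DP (max over eligible predecessors, no parent pointers) and reconstructs the answer afterwards by re-searching the first predecessor of length dp[i]-1, building the list front-first by prepending, instead of A's DP over (length, parent) pairs followed by pointer-chasing and a final reverse; the distance-1 test is a zip/sum count instead of A's indexed loop with early break.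
import Mathlib
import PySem

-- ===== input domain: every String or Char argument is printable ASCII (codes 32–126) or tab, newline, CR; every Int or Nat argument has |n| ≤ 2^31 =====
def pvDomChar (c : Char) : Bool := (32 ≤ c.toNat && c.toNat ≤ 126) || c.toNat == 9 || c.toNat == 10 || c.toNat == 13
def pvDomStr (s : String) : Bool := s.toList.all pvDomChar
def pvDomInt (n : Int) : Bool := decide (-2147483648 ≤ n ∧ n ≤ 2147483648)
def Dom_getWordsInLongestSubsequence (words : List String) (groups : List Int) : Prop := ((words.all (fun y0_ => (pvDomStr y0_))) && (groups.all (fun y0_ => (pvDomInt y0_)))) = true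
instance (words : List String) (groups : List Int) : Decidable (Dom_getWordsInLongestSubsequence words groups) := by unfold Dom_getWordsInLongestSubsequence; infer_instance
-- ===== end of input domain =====

-- B replaces A's (length, parent)-pair DP + pointer chase + reverse by a lengths-only DP with a
-- front-first predecessor-research reconstruction (alternative decomposition, same asymptotic cost).

-- ===== PORT A =====

-- A's inner character loop: dis is incremented at each mismatch and the loop breaks as soon as
-- dis > 1.  The loop runs over k in range(len(word)) indexing both words; it is only reached after
-- the equal-length guard, so the paired structural recursion is exact there.
def pvDisA : List Char → List Char → Int → Int
  | c :: cs, d :: ds, dis =>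
      if c ≠ d then
        if dis + 1 > 1 then dis + 1 else pvDisA cs ds (dis + 1)
      else pvDisA cs ds dis
  | _, _, dis => dis

-- A's inner j-loop: the running (maxLen, maxJ) state.  All list indices that A uses are
-- nonnegative and in range under Pre_, so List.getD with Nat indices is exact.
def pvInnerA (words : List String) (groups : List Int) (dp : List (Int × Int)) (i : Nat) : Int × Int :=
  (List.range i).foldl (fun st j =>
    if groups.getD j 0 == groups.getD i 0 then st
    else if (words.getD j "").toList.length ≠ (words.getD i "").toList.length then st
    else if pvDisA (words.getD i "").toList (words.getD j "").toList 0 == 1 then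
      (if (dp.getD j (0, 0)).1 + 1 > st.1 then ((dp.getD j (0, 0)).1 + 1, (j : Int)) else st)
    else st) (1, -1)

-- A's outer loop building dp by appending one (maxLen, maxJ) pair per word.
def pvDpA (words : List String) (groups : List Int) : List (Int × Int) :=
  (List.range words.length).foldl (fun dp i => dp ++ [pvInnerA words groups dp i]) []

-- A's final while loop: follow parent pointers, appending words; fuel (dp.length + 1) is enough
-- because the stored parent index is strictly smaller than the current index.
def pvWalkA (words : List String) (dp : List (Int × Int)) : Nat → Int → List String → List String
  | 0, _, ans => ans
  | fuel + 1, index, ans =>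
      if 0 ≤ index then
        pvWalkA words dp fuel (dp.getD index.toNat (0, 0)).2 (ans ++ [words.getD index.toNat ""])
      else ans

def getWordsInLongestSubsequence (words : List String) (groups : List Int) : List String :=
  let dp := pvDpA words groups
  match PySem.List.max? (List.range dp.length) (fun i => (dp.getD i (0, 0)).1) with
  | none => []   -- Python: max() over the empty range raises ValueError; excluded by Pre_
  | some index => (pvWalkA words dp (dp.length + 1) (index : Int) []).reverse

-- ===== PORT B =====

-- B's eligibility test: different group, equal length, exactly one mismatching position
-- (sum of booleans over zip = countP).
def pvOkB (words : List String) (groups : List Int) (i j : Nat) : Bool :=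
  (groups.getD i 0 != groups.getD j 0) &&
  ((words.getD i "").toList.length == (words.getD j "").toList.length) &&
  (((words.getD i "").toList.zip (words.getD j "").toList).countP (fun p => p.1 != p.2) == 1)

-- B's lengths-only DP: dp.append(1 + max((dp[j] for j in range(i) if ok(i, j)), default=0)).
def pvDpB (words : List String) (groups : List Int) : List Int :=
  (List.range words.length).foldl (fun dp i =>
    dp ++ [1 + PySem.List.maxD (((List.range i).filter (fun j => pvOkB words groups i j)).map
      (fun j => dp.getD j 0)) (fun x => x) 0]) []

-- B's reconstruction loop: prepend words[i]; stop at dp[i] == 1, else move to the first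
-- predecessor j with ok(i, j) and dp[j] == dp[i] - 1 (Python's next(...); for the dp built above
-- it always exists, so the none branch is unreachable).  Fuel dp.length suffices since j < i.
def pvWalkB (words : List String) (groups : List Int) (dp : List Int) : Nat → Nat → List String → List String
  | 0, _, ans => ans
  | fuel + 1, i, ans =>
      let ans2 := words.getD i "" :: ans
      if dp.getD i 0 == 1 then ans2
      else
        match (List.range i).find? (fun j => pvOkB words groups i j && (dp.getD j 0 == dp.getD i 0 - 1)) with
        | some j => pvWalkB words groups dp fuel j ans2
        | none => ans2

def getWordsInLongestSubsequence_alt (words : List String) (groups : List Int) : List String :=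
  if words.isEmpty then []
  else
    let dp := pvDpB words groups
    match PySem.List.max? dp (fun x => x) with
    | none => []
    | some m =>
      match PySem.List.index? dp m with
      | none => []
      | some i => pvWalkB words groups dp dp.length i []

-- ===== PRECONDITION & SPEC =====
-- Pre_ excludes exactly the inputs where Python A raises: the empty word list (ValueError from
-- max over an empty range) and groups shorter than words (IndexError on groups[i]).
def Pre_getWordsInLongestSubsequence (words : List String) (groups : List Int) : Prop :=
  words ≠ [] ∧ words.length ≤ groups.length
instance (words : List String) (groups : List Int) : Decidable (Pre_getWordsInLongestSubsequence words groups) := by unfold Pre_getWordsInLongestSubsequence; infer_instance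
def pvWitness_getWordsInLongestSubsequence : List String × List Int := (["ab", "ac", "bc"], [1, 2, 2])

def Spec_getWordsInLongestSubsequence (words : List String) (groups : List Int) (out : List String) : Prop := out = getWordsInLongestSubsequence_alt words groups
instance (words : List String) (groups : List Int) (out : List String) : Decidable (Spec_getWordsInLongestSubsequence words groups out) := by unfold Spec_getWordsInLongestSubsequence; infer_instance

-- ===== CLAIM (what is proved, stated in full; the proofs are below) =====
def Claim_equal_getWordsInLongestSubsequence : Prop := ∀ (words : List String) (groups : List Int), Dom_getWordsInLongestSubsequence words groups → Pre_getWordsInLongestSubsequence words groups → Spec_getWordsInLongestSubsequence words groups (getWordsInLongestSubsequence words groups)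

-- ===== LEMMAS AND PROOFS =====

-- The append-only builder common to both dp loops.
def pvBuild {β : Type} (g : List β → Nat → β) : Nat → List β
  | 0 => []
  | k + 1 => pvBuild g k ++ [g (pvBuild g k) k]

theorem pvBuild_eq_foldl {β : Type} (g : List β → Nat → β) (k : Nat) :
    (List.range k).foldl (fun acc i => acc ++ [g acc i]) [] = pvBuild g k := by
  induction k with
  | zero => rfl
  | succ k ih => simp [List.range_succ, pvBuild, ih]

theorem pvBuild_length {β : Type} (g : List β → Nat → β) (k : Nat) :
    (pvBuild g k).length = k := by
  induction k with
  | zero => rfl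
  | succ k ih => simp [pvBuild, ih]

theorem pvBuild_prefix {β : Type} (g : List β → Nat → β) {k n : Nat} (h : k ≤ n) :
    ∃ t, pvBuild g n = pvBuild g k ++ t := by
  induction n with
  | zero => exact ⟨[], by simp [Nat.le_zero.mp h]⟩
  | succ n ih =>
    rcases Nat.lt_or_ge k (n + 1) with h' | h'
    · rcases ih (Nat.lt_succ_iff.mp h') with ⟨t, ht⟩
      exact ⟨t ++ [g (pvBuild g n) n], by simp [pvBuild, ht]⟩
    · have : k = n + 1 := le_antisymm h h'
      exact ⟨[], by simp [this]⟩

theorem pvBuild_getD_stable {β : Type} (g : List β → Nat → β) {k n j : Nat} (hk : k ≤ n)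
    (hj : j < k) (d : β) : (pvBuild g n).getD j d = (pvBuild g k).getD j d := by
  rcases pvBuild_prefix g hk with ⟨t, ht⟩
  rw [ht]
  have hjl : j < (pvBuild g k).length := by rw [pvBuild_length]; exact hj
  simp [List.getD, List.getElem?_append_left hjl]

theorem pvBuild_getD_last {β : Type} (g : List β → Nat → β) (k : Nat) (d : β) :
    (pvBuild g (k + 1)).getD k d = g (pvBuild g k) k := by
  have h : (pvBuild g k).length = k := pvBuild_length g k
  have h2 : (pvBuild g k ++ [g (pvBuild g k) k]).getD (pvBuild g k).length d
      = g (pvBuild g k) k := by simp [List.getD]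
  rw [h] at h2
  rw [pvBuild]
  exact h2

-- characterisation of pvDisA (A's early-break mismatch counter)
theorem pvDisA_one (u v : List Char) :
    pvDisA u v 1 = if (u.zip v).countP (fun p => p.1 != p.2) = 0 then 1 else 2 := by
  induction u generalizing v with
  | nil => simp [pvDisA]
  | cons c cs ih =>
    cases v with
    | nil => simp [pvDisA]
    | cons d ds =>
      by_cases h : c = d
      · simp [pvDisA, h, ih]
      · simp [pvDisA, h]

theorem pvDisA_zero (u v : List Char) :
    pvDisA u v 0 =
      if (u.zip v).countP (fun p => p.1 != p.2) = 0 then 0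
      else if (u.zip v).countP (fun p => p.1 != p.2) = 1 then 1 else 2 := by
  induction u generalizing v with
  | nil => simp [pvDisA]
  | cons c cs ih =>
    cases v with
    | nil => simp [pvDisA]
    | cons d ds =>
      by_cases h : c = d
      · simp [pvDisA, h, ih]
      · simp [pvDisA, h, pvDisA_one]

-- max? over a range is the first index attaining the maximum of the key
theorem pvMax?_range (key : Nat → Int) : ∀ n : Nat, 0 < n →
    ∃ k, k < n ∧ PySem.List.max? (List.range n) key = some k ∧
      (∀ j, j < n → key j ≤ key k) ∧ (∀ j, j < k → key j < key k) := by
  intro n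
  induction n with
  | zero => omega
  | succ n ih =>
    intro _
    by_cases hn : n = 0
    · subst hn
      refine ⟨0, by omega, by simp [PySem.List.max?, List.range_succ], ?_, by omega⟩
      intro j hj
      have : j = 0 := by omega
      simp [this]
    · obtain ⟨k, hk, hm, hle, hlt⟩ := ih (Nat.pos_of_ne_zero hn)
      unfold PySem.List.max? at hm ⊢
      rw [List.range_succ, List.foldl_append, hm]
      by_cases hc : key k < key n
      · refine ⟨n, by omega, by simp [hc], ?_, ?_⟩
        · intro j hj
          rcases Nat.lt_succ_iff_lt_or_eq.mp hj with h | h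
          · exact le_of_lt (lt_of_le_of_lt (hle j h) hc)
          · simp [h]
        · intro j hj
          exact lt_of_le_of_lt (hle j hj) hc
      · refine ⟨k, by omega, by simp [hc], ?_, hlt⟩
        intro j hj
        rcases Nat.lt_succ_iff_lt_or_eq.mp hj with h | h
        · exact hle j h
        · simpa [h] using not_lt.mp hc

-- maxD over a list of positive ints is the running max from 0
theorem pvMaxD_foldl (xs : List Int) (h : ∀ x ∈ xs, 1 ≤ x) :
    PySem.List.maxD xs (fun x => x) 0 = xs.foldl max 0 := by
  cases xs with
  | nil => rfl
  | cons x t =>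
    have hx : max 0 x = x := max_eq_right (by have := h x (by simp); omega)
    simp [PySem.List.maxD, PySem.List.max?_id_cons, List.foldl_cons, hx]

theorem pvMaxD_nonneg (xs : List Int) (h : ∀ x ∈ xs, 0 ≤ x) :
    0 ≤ PySem.List.maxD xs (fun x => x) 0 := by
  unfold PySem.List.maxD
  cases hm : PySem.List.max? xs (fun x => x) with
  | none => simp
  | some m => simpa using h m (PySem.List.max?_mem hm)

-- the reconstruction chain both walks produce
def pvChain (words : List String) (groups : List Int) (dp : List Int) : Nat → Nat → List String
  | 0, _ => []
  | f + 1, i =>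
      match (List.range i).find? (fun j => pvOkB words groups i j && (dp.getD j 0 == dp.getD i 0 - 1)) with
      | none => [words.getD i ""]
      | some j => words.getD i "" :: pvChain words groups dp f j

theorem pvChain_stable (words : List String) (groups : List Int) (dp : List Int) :
    ∀ i f f', i < f → i < f' → pvChain words groups dp f i = pvChain words groups dp f' i := by
  intro i
  induction i using Nat.strong_induction_on with
  | _ i ih =>
    intro f f' hf hf'
    cases f with
    | zero => omega
    | succ f =>
      cases f' with
      | zero => omega
      | succ f' =>
        simp only [pvChain]
        cases hfind : (List.range i).find? (fun j => pvOkB words groups i j && (dp.getD j 0 == dp.getD i 0 - 1)) with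
        | none => rfl
        | some j =>
          have hj : j < i := List.mem_range.mp (List.mem_of_find?_eq_some hfind)
          show words.getD i "" :: pvChain words groups dp f j
            = words.getD i "" :: pvChain words groups dp f' j
          rw [ih j hj f f' (by omega) (by omega)]

-- ===== main correspondence =====

-- proof-side abbreviations
def pvGA (words : List String) (groups : List Int) : List (Int × Int) → Nat → Int × Int :=
  fun dp i => pvInnerA words groups dp i

def pvGB (words : List String) (groups : List Int) : List Int → Nat → Int :=
  fun dp i => 1 + PySem.List.maxD (((List.range i).filter (fun j => pvOkB words groups i j)).map
    (fun j => dp.getD j 0)) (fun x => x) 0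

def pvV (words : List String) (groups : List Int) (j : Nat) : Int :=
  (pvDpB words groups).getD j 0

def pvF (words : List String) (groups : List Int) (i m : Nat) : Int :=
  (((List.range m).filter (fun j => pvOkB words groups i j)).map
    (fun j => pvV words groups j)).foldl max 0

def pvJ (words : List String) (groups : List Int) (i m : Nat) : Int :=
  match (List.range m).find? (fun j => pvOkB words groups i j &&
      (pvV words groups j == pvF words groups i m)) with
  | some j => (j : Int)
  | none => -1

def pvSA (words : List String) (groups : List Int) (dp : List (Int × Int)) (i : Nat) :
    (Int × Int) → Nat → (Int × Int) := fun st j =>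
    if groups.getD j 0 == groups.getD i 0 then st
    else if (words.getD j "").toList.length ≠ (words.getD i "").toList.length then st
    else if pvDisA (words.getD i "").toList (words.getD j "").toList 0 == 1 then
      (if (dp.getD j (0, 0)).1 + 1 > st.1 then ((dp.getD j (0, 0)).1 + 1, (j : Int)) else st)
    else st

theorem pvInnerA_eq (words : List String) (groups : List Int) (dp : List (Int × Int)) (i : Nat) :
    pvInnerA words groups dp i = (List.range i).foldl (pvSA words groups dp i) (1, -1) := rfl

theorem pvDpA_eq_build (words : List String) (groups : List Int) :
    pvDpA words groups = pvBuild (pvGA words groups) words.length :=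
  pvBuild_eq_foldl (pvGA words groups) words.length

theorem pvDpB_eq_build (words : List String) (groups : List Int) :
    pvDpB words groups = pvBuild (pvGB words groups) words.length :=
  pvBuild_eq_foldl (pvGB words groups) words.length

theorem pvDpB_length (words : List String) (groups : List Int) :
    (pvDpB words groups).length = words.length := by
  rw [pvDpB_eq_build]; exact pvBuild_length _ _

theorem pvGetD_nonneg (l : List Int) (h : ∀ x ∈ l, 1 ≤ x) (j : Nat) : 0 ≤ l.getD j 0 := by
  rw [List.getD]
  cases hg : l[j]? with
  | none => simp
  | some y =>
    have : y ∈ l := List.mem_of_getElem? hg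
    have := h y this
    simp; omega

theorem pvBuildB_pos (words : List String) (groups : List Int) :
    ∀ k, ∀ x ∈ pvBuild (pvGB words groups) k, 1 ≤ x := by
  intro k
  induction k with
  | zero => simp [pvBuild]
  | succ k ih =>
    intro x hx
    rw [pvBuild] at hx
    rcases List.mem_append.mp hx with h | h
    · exact ih x h
    · have hx' : x = pvGB words groups (pvBuild (pvGB words groups) k) k := by simpa using h
      subst hx'
      have h0 : 0 ≤ PySem.List.maxD (((List.range k).filter (fun j => pvOkB words groups k j)).map
          (fun j => (pvBuild (pvGB words groups) k).getD j 0)) (fun x => x) 0 := by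
        apply pvMaxD_nonneg
        intro y hy
        rcases List.mem_map.mp hy with ⟨j, _, rfl⟩
        exact pvGetD_nonneg _ ih j
      show 1 ≤ 1 + _
      omega

theorem pvDpB_pos (words : List String) (groups : List Int) :
    ∀ x ∈ pvDpB words groups, 1 ≤ x := by
  rw [pvDpB_eq_build]; exact pvBuildB_pos words groups words.length

theorem pvV_pos (words : List String) (groups : List Int) (j : Nat) (hj : j < words.length) :
    1 ≤ pvV words groups j := by
  have hl : j < (pvDpB words groups).length := by rw [pvDpB_length]; exact hj
  rw [pvV, List.getD_eq_getElem _ _ hl]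
  exact pvDpB_pos words groups _ (List.getElem_mem hl)

-- B's dp entry: one more than the running max over eligible predecessors
theorem pvDpB_entry (words : List String) (groups : List Int) (i : Nat) (hi : i < words.length) :
    pvV words groups i = 1 + pvF words groups i i := by
  have h1 : pvV words groups i = pvGB words groups (pvBuild (pvGB words groups) i) i := by
    rw [pvV, pvDpB_eq_build,
      pvBuild_getD_stable (pvGB words groups) hi (Nat.lt_succ_self i) 0,
      pvBuild_getD_last]
  rw [h1]
  show 1 + _ = 1 + _
  congr 1
  have hmap : ((List.range i).filter (fun j => pvOkB words groups i j)).map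
      (fun j => (pvBuild (pvGB words groups) i).getD j 0)
      = ((List.range i).filter (fun j => pvOkB words groups i j)).map
      (fun j => pvV words groups j) := by
    apply List.map_congr_left
    intro j hj
    have hji : j < i := List.mem_range.mp (List.mem_of_mem_filter hj)
    rw [pvV, pvDpB_eq_build, pvBuild_getD_stable (pvGB words groups) (le_of_lt hi) hji 0]
  rw [hmap]
  apply pvMaxD_foldl
  intro x hx
  rcases List.mem_map.mp hx with ⟨j, hj, rfl⟩
  exact pvV_pos words groups j (lt_trans (List.mem_range.mp (List.mem_of_mem_filter hj)) hi)

theorem pvF_le (words : List String) (groups : List Int) (i m j : Nat) (hj : j < m)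
    (hok : pvOkB words groups i j = true) : pvV words groups j ≤ pvF words groups i m := by
  apply (PySem.List.le_foldl_max _ _).2
  exact List.mem_map.mpr ⟨j, List.mem_filter.mpr ⟨List.mem_range.mpr hj, hok⟩, rfl⟩

theorem pvF_attain (words : List String) (groups : List Int) (i m : Nat) :
    pvF words groups i m = 0 ∨
      ∃ j, j < m ∧ pvOkB words groups i j = true ∧ pvV words groups j = pvF words groups i m := by
  rcases PySem.List.foldl_max_mem (((List.range m).filter (fun j => pvOkB words groups i j)).map
    (fun j => pvV words groups j)) 0 with h | h
  · exact Or.inl h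
  · rcases List.mem_map.mp h with ⟨j, hj, he⟩
    exact Or.inr ⟨j, List.mem_range.mp (List.mem_of_mem_filter hj),
      (List.mem_filter.mp hj).2, he⟩

theorem pvF_succ (words : List String) (groups : List Int) (i m : Nat) :
    pvF words groups i (m + 1) =
      if pvOkB words groups i m then max (pvF words groups i m) (pvV words groups m)
      else pvF words groups i m := by
  by_cases hok : pvOkB words groups i m = true
  · simp [pvF, List.range_succ, List.filter_append, hok]
  · simp only [Bool.not_eq_true] at hok
    simp [pvF, List.range_succ, List.filter_append, hok]

theorem pvSA_not_ok (words : List String) (groups : List Int) (dp : List (Int × Int)) (i m : Nat)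
    (st : Int × Int) (hok : pvOkB words groups i m = false) :
    pvSA words groups dp i st m = st := by
  unfold pvSA
  by_cases hg : groups.getD m 0 = groups.getD i 0
  · rw [if_pos (beq_iff_eq.mpr hg)]
  · rw [if_neg (fun h => hg (beq_iff_eq.mp h))]
    by_cases hl : (words.getD m "").toList.length = (words.getD i "").toList.length
    · rw [if_neg (not_not_intro hl)]
      have hc : ¬ ((words.getD i "").toList.zip (words.getD m "").toList).countP
          (fun p => p.1 != p.2) = 1 := by
        intro hc
        rw [pvOkB] at hok
        simp only [Bool.and_eq_false_iff, bne_eq_false_iff_eq, beq_eq_false_iff_ne, ne_eq] at hok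
        rcases hok with h | h
        · rcases h with h | h
          · exact hg h.symm
          · exact h hl.symm
        · exact h hc
      have hd : (pvDisA (words.getD i "").toList (words.getD m "").toList 0 == 1) = false := by
        by_cases h0 : ((words.getD i "").toList.zip (words.getD m "").toList).countP
            (fun p => p.1 != p.2) = 0
        · rw [pvDisA_zero, if_pos h0]; decide
        · rw [pvDisA_zero, if_neg h0, if_neg hc]; decide
      rw [if_neg (by rw [hd]; decide)]
    · rw [if_pos hl]

theorem pvSA_ok (words : List String) (groups : List Int) (dp : List (Int × Int)) (i m : Nat)
    (st : Int × Int) (hok : pvOkB words groups i m = true) :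
    pvSA words groups dp i st m =
      (if (dp.getD m (0, 0)).1 + 1 > st.1 then ((dp.getD m (0, 0)).1 + 1, (m : Int)) else st) := by
  rw [pvOkB] at hok
  simp only [Bool.and_eq_true, bne_iff_ne, ne_eq, beq_iff_eq] at hok
  obtain ⟨⟨hne, hlen⟩, hcnt⟩ := hok
  unfold pvSA
  rw [if_neg (fun h => hne (beq_iff_eq.mp h).symm), if_neg (not_not_intro hlen.symm)]
  have hd : (pvDisA (words.getD i "").toList (words.getD m "").toList 0 == 1) = true := by
    rw [pvDisA_zero, hcnt]
    decide
  rw [if_pos hd]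

theorem pvJ_succ_notok (words : List String) (groups : List Int) (i m : Nat)
    (hok : pvOkB words groups i m = false) :
    pvJ words groups i (m + 1) = pvJ words groups i m := by
  rw [pvJ, pvJ, pvF_succ, hok]
  simp only [if_false, Bool.false_eq_true]
  rw [List.range_succ, List.find?_append]
  cases hfind : (List.range m).find? (fun j => pvOkB words groups i j &&
      (pvV words groups j == pvF words groups i m)) with
  | some j => simp
  | none => simp [hok]

-- A's inner-loop invariant: the running (maxLen, maxJ) pair is determined by F and the first
-- attaining index
theorem pvInner_inv (words : List String) (groups : List Int) (i : Nat) (hi : i < words.length)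
    (hIH : ∀ j, j < i →
      ((pvBuild (pvGA words groups) i).getD j (0, 0)).1 = pvV words groups j) :
    ∀ m, m ≤ i →
      (List.range m).foldl (pvSA words groups (pvBuild (pvGA words groups) i) i) (1, -1)
        = (pvF words groups i m + 1, pvJ words groups i m) := by
  intro m
  induction m with
  | zero => intro _; simp [pvF, pvJ]
  | succ m ih =>
    intro hm1
    have hm : m < i := hm1
    rw [List.range_succ, List.foldl_append, ih (le_of_lt hm)]
    simp only [List.foldl_cons, List.foldl_nil]
    by_cases hok : pvOkB words groups i m = true
    · rw [pvSA_ok words groups _ i m _ hok]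
      have hvm : ((pvBuild (pvGA words groups) i).getD m (0, 0)).1 = pvV words groups m :=
        hIH m hm
      rw [hvm]
      by_cases hgt : pvF words groups i m < pvV words groups m
      · rw [if_pos (by simp; omega)]
        have hF : pvF words groups i (m + 1) = pvV words groups m := by
          rw [pvF_succ, if_pos hok, max_eq_right (le_of_lt hgt)]
        refine Prod.ext (by simp [hF]) ?_
        show (m : Int) = pvJ words groups i (m + 1)
        rw [pvJ]
        have hnone : (List.range m).find? (fun j => pvOkB words groups i j &&
            (pvV words groups j == pvF words groups i (m + 1))) = none := by
          rw [List.find?_eq_none]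
          intro j hj
          simp only [Bool.and_eq_true, beq_iff_eq, not_and]
          intro hokj
          have := pvF_le words groups i m j (List.mem_range.mp hj) hokj
          rw [hF]
          omega
        rw [List.range_succ, List.find?_append, hnone]
        simp [hok, hF]
      · have hge : pvV words groups m ≤ pvF words groups i m := by omega
        rw [if_neg (by simp; omega)]
        have hF : pvF words groups i (m + 1) = pvF words groups i m := by
          rw [pvF_succ, if_pos hok, max_eq_left hge]
        refine Prod.ext (by simp [hF]) ?_
        show pvJ words groups i m = pvJ words groups i (m + 1)
        rw [pvJ, pvJ, hF, List.range_succ, List.find?_append]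
        cases hfind : (List.range m).find? (fun j => pvOkB words groups i j &&
            (pvV words groups j == pvF words groups i m)) with
        | some j => simp
        | none =>
          have hF0 : pvF words groups i m = 0 := by
            rcases pvF_attain words groups i m with h0 | ⟨j, hj, hokj, hvj⟩
            · exact h0
            · exfalso
              have := List.find?_eq_none.mp hfind j (List.mem_range.mpr hj)
              simp [hokj, hvj] at this
          have hvm1 : 1 ≤ pvV words groups m :=
            pvV_pos words groups m (lt_trans hm hi)
          have hpm : (pvOkB words groups i m &&
              (pvV words groups m == pvF words groups i m)) = false := by
            simp only [Bool.and_eq_false_iff]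
            right
            simp only [beq_eq_false_iff_ne, ne_eq]
            omega
          simp [hpm]
    · have hokf : pvOkB words groups i m = false := eq_false_of_ne_true hok
      rw [pvSA_not_ok words groups _ i m _ hokf]
      rw [pvJ_succ_notok words groups i m hokf]
      have hF : pvF words groups i (m + 1) = pvF words groups i m := by
        rw [pvF_succ, if_neg (by simp [hokf])]
      rw [hF]

theorem pvDp_corr (words : List String) (groups : List Int) :
    ∀ i, i < words.length →
      (pvDpA words groups).getD i (0, 0) = (pvV words groups i, pvJ words groups i i) := by
  intro i
  induction i using Nat.strong_induction_on with
  | _ i ih =>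
    intro hi
    have hstable : ∀ j, j < i →
        ((pvBuild (pvGA words groups) i).getD j (0, 0)).1 = pvV words groups j := by
      intro j hj
      have : (pvBuild (pvGA words groups) i).getD j (0, 0)
          = (pvDpA words groups).getD j (0, 0) := by
        rw [pvDpA_eq_build,
          pvBuild_getD_stable (pvGA words groups) (le_of_lt hi) hj,
          pvBuild_getD_stable (pvGA words groups) (le_refl i) hj]
      rw [this, ih j hj (lt_trans hj hi)]
    have h1 : (pvDpA words groups).getD i (0, 0)
        = pvInnerA words groups (pvBuild (pvGA words groups) i) i := by
      rw [pvDpA_eq_build,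
        pvBuild_getD_stable (pvGA words groups) hi (Nat.lt_succ_self i) (0, 0),
        pvBuild_getD_last]
      rfl
    rw [h1, pvInnerA_eq, pvInner_inv words groups i hi hstable i (le_refl i)]
    have := pvDpB_entry words groups i hi
    refine Prod.ext ?_ rfl
    simp
    omega

-- the predecessor search in the chain: none iff dp value is 1
theorem pvPrev_none_iff (words : List String) (groups : List Int) (i : Nat) (hi : i < words.length) :
    ((List.range i).find? (fun j => pvOkB words groups i j &&
        ((pvDpB words groups).getD j 0 == (pvDpB words groups).getD i 0 - 1)) = none)
      ↔ pvV words groups i = 1 := by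
  have hentry := pvDpB_entry words groups i hi
  have hpred : (fun j => pvOkB words groups i j &&
        ((pvDpB words groups).getD j 0 == (pvDpB words groups).getD i 0 - 1))
      = (fun j => pvOkB words groups i j && (pvV words groups j == pvF words groups i i)) := by
    funext j
    have : (pvDpB words groups).getD i 0 - 1 = pvF words groups i i := by
      rw [show (pvDpB words groups).getD i 0 = pvV words groups i from rfl, hentry]; ring
    rw [this]
    rfl
  rw [hpred]
  constructor
  · intro hnone
    rcases pvF_attain words groups i i with h0 | ⟨j, hj, hokj, hvj⟩
    · omega
    · exfalso
      have := List.find?_eq_none.mp hnone j (List.mem_range.mpr hj)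
      simp [hokj, hvj] at this
  · intro h1
    rw [List.find?_eq_none]
    intro j hj
    simp only [Bool.and_eq_true, beq_iff_eq, not_and]
    intro hokj
    have hvp := pvV_pos words groups j (lt_trans (List.mem_range.mp hj) hi)
    omega

theorem pvPrev_lt (words : List String) (groups : List Int) (i j : Nat)
    (h : (List.range i).find? (fun j => pvOkB words groups i j &&
        ((pvDpB words groups).getD j 0 == (pvDpB words groups).getD i 0 - 1)) = some j) :
    j < i := List.mem_range.mp (List.mem_of_find?_eq_some h)

theorem pvWalkA_eq (words : List String) (groups : List Int) :
    ∀ f i ans, i < words.length → i + 2 ≤ f →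
      pvWalkA words (pvDpA words groups) f (i : Int) ans =
        ans ++ pvChain words groups (pvDpB words groups) (i + 1) i := by
  intro f
  induction f with
  | zero => intro i ans _ h; omega
  | succ f ihf =>
    intro i ans hi hf
    rw [pvWalkA]
    rw [if_pos (by positivity)]
    have htn : ((i : Int)).toNat = i := Int.toNat_natCast i
    rw [htn]
    have hcorr := pvDp_corr words groups i hi
    rw [hcorr]
    show pvWalkA words (pvDpA words groups) f (pvJ words groups i i)
        (ans ++ [words.getD i ""]) = _
    rw [pvChain]
    rw [pvJ]
    have hpred : (fun j => pvOkB words groups i j && (pvV words groups j == pvF words groups i i))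
        = (fun j => pvOkB words groups i j &&
            ((pvDpB words groups).getD j 0 == (pvDpB words groups).getD i 0 - 1)) := by
      funext j
      have : (pvDpB words groups).getD i 0 - 1 = pvF words groups i i := by
        have := pvDpB_entry words groups i hi
        rw [show (pvDpB words groups).getD i 0 = pvV words groups i from rfl, this]; ring
      rw [this]
      rfl
    rw [hpred]
    cases hfind : (List.range i).find? (fun j => pvOkB words groups i j &&
        ((pvDpB words groups).getD j 0 == (pvDpB words groups).getD i 0 - 1)) with
    | none =>
      cases f with
      | zero => omega
      | succ f =>
        rw [pvWalkA]
        simp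
    | some j =>
      have hj : j < i := pvPrev_lt words groups i j hfind
      rw [ihf j (ans ++ [words.getD i ""]) (lt_trans hj hi) (by omega)]
      rw [pvChain_stable words groups (pvDpB words groups) j (j + 1) i
        (Nat.lt_succ_self j) hj]
      simp

theorem pvWalkB_eq (words : List String) (groups : List Int) :
    ∀ f i ans, i < words.length → i + 1 ≤ f →
      pvWalkB words groups (pvDpB words groups) f i ans =
        (pvChain words groups (pvDpB words groups) (i + 1) i).reverse ++ ans := by
  intro f
  induction f with
  | zero => intro i ans _ h; omega
  | succ f ihf =>
    intro i ans hi hf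
    rw [pvWalkB, pvChain]
    cases hfind : (List.range i).find? (fun j => pvOkB words groups i j &&
        ((pvDpB words groups).getD j 0 == (pvDpB words groups).getD i 0 - 1)) with
    | none =>
      have h1 : pvV words groups i = 1 := (pvPrev_none_iff words groups i hi).mp hfind
      rw [if_pos (by simpa [pvV] using h1)]
      simp
    | some j =>
      have h1 : ¬ pvV words groups i = 1 := by
        intro h1
        have hn := (pvPrev_none_iff words groups i hi).mpr h1
        rw [hn] at hfind
        cases hfind
      rw [if_neg (by simpa [pvV] using h1)]
      have hj : j < i := pvPrev_lt words groups i j hfind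
      show pvWalkB words groups (pvDpB words groups) f j (words.getD i "" :: ans)
          = (words.getD i "" :: pvChain words groups (pvDpB words groups) i j).reverse ++ ans
      rw [ihf j _ (lt_trans hj hi) (by omega)]
      rw [pvChain_stable words groups (pvDpB words groups) j i (j + 1) hj
        (Nat.lt_succ_self j)]
      simp

-- ===== VERDICT (by name: the statement is the Claim_ definition above) =====
theorem pvFinal (words : List String) (groups : List Int)
    (hne : words ≠ []) :
    getWordsInLongestSubsequence words groups = getWordsInLongestSubsequence_alt words groups := by
  have hn : 0 < words.length := List.length_pos_of_ne_nil hne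
  have hlenA : (pvDpA words groups).length = words.length := by
    rw [pvDpA_eq_build]; exact pvBuild_length _ _
  have hlenB := pvDpB_length words groups
  obtain ⟨k, hk, hmax, hle, hlt⟩ :=
    pvMax?_range (fun i => ((pvDpA words groups).getD i (0, 0)).1) words.length hn
  have hkeyV : ∀ j, j < words.length →
      ((pvDpA words groups).getD j (0, 0)).1 = pvV words groups j := by
    intro j hj; rw [pvDp_corr words groups j hj]
  have hBne : pvDpB words groups ≠ [] := by
    intro h; rw [h] at hlenB; simp at hlenB; omega
  obtain ⟨M, hM⟩ : ∃ M, PySem.List.max? (pvDpB words groups) (fun x => x) = some M := by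
    cases h : PySem.List.max? (pvDpB words groups) (fun x => x) with
    | none => exact absurd ((PySem.List.max?_eq_none_iff _ _).mp h) hBne
    | some M => exact ⟨M, rfl⟩
  have hMmem : M ∈ pvDpB words groups := PySem.List.max?_mem hM
  have hMmax : ∀ y ∈ pvDpB words groups, y ≤ M := fun y hy => PySem.List.max?_isMax hM y hy
  obtain ⟨i0, hI⟩ : ∃ i0, PySem.List.index? (pvDpB words groups) M = some i0 :=
    Option.isSome_iff_exists.mp ((PySem.List.index?_isSome_iff _ _).mpr hMmem)
  obtain ⟨hi0len, hi0val, hi0first⟩ := PySem.List.getElem_of_index?_eq_some hI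
  have hi0n : i0 < words.length := by rw [← hlenB]; exact hi0len
  have hVget : ∀ j, (hj : j < words.length) →
      pvV words groups j = (pvDpB words groups)[j]'(by rw [hlenB]; exact hj) := by
    intro j hj
    exact List.getD_eq_getElem _ _ (by rw [hlenB]; exact hj)
  have hVk : pvV words groups k = M := by
    apply le_antisymm
    · rw [hVget k hk]
      exact hMmax _ (List.getElem_mem _)
    · have h1 : M = pvV words groups i0 := by rw [hVget i0 hi0n, hi0val]
      have h2 := hle i0 hi0n
      rw [hkeyV i0 hi0n, hkeyV k hk] at h2
      omega
  have hki : k = i0 := by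
    rcases lt_trichotomy k i0 with h | h | h
    · exfalso
      exact hi0first k h (by rw [← hVget k hk]; exact hVk)
    · exact h
    · exfalso
      have := hlt i0 h
      rw [hkeyV i0 hi0n, hkeyV k hk] at this
      rw [hVget i0 hi0n, hi0val] at this
      omega
  have hA : getWordsInLongestSubsequence words groups
      = (pvWalkA words (pvDpA words groups) ((pvDpA words groups).length + 1) (k : Int) []).reverse := by
    simp only [getWordsInLongestSubsequence]
    rw [hlenA, hmax]
  have hB : getWordsInLongestSubsequence_alt words groups
      = pvWalkB words groups (pvDpB words groups) (pvDpB words groups).length i0 [] := by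
    simp only [getWordsInLongestSubsequence_alt]
    rw [if_neg (by simp [hne]), hM]
    show (match PySem.List.index? (pvDpB words groups) M with
      | none => []
      | some i => pvWalkB words groups (pvDpB words groups) (pvDpB words groups).length i []) = _
    rw [hI]
  rw [hA, hB, hlenA, hlenB]
  rw [pvWalkA_eq words groups (words.length + 1) k [] hk (by omega)]
  rw [pvWalkB_eq words groups words.length i0 [] hi0n (by omega)]
  rw [hki]
  simp

theorem getWordsInLongestSubsequence_spec : Claim_equal_getWordsInLongestSubsequence := by
  intro words groups _ hpre
  exact pvFinal words groups hpre.1
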